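-- pv_equiv track=rewrite | github.com/kmosher44/python_prototype | sawtooth.py | generate_sawtooth
-- ===== SOURCE A (Python) =====
-- from typing import Tuple
--
-- def generate_sawtooth(points: int, turn_point: int) -> Tuple[list[int], list[int]]:
--     """Generates two list of integers that can be used to plot a sawtooth shape on a
--     scatter plot. The first represents the x values and the second list represents the
--     y values for plotting. The first value in each list is 0, representing a point at
--     the origin. All subsequent x values increment by 1. All subsequent y values
--     increment by 1 until the turn_point, after which they decrement by 1 until 0, then
--     repeat until "points" values exist in each list.
--
--     args:
--     -points: total count of points in sawtooth, also represents the result list lengths.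
--     -turn_point: The point at which the sawtooth "turns around". For example, if 10,
--         the resulting y value list would have [...8, 9, 10, 9, 8...] and
--         [..., 2, 1, 0, 1, 2...] as the two turn around points.
--
--     returns:
--     -list of length points to represent x values in sawtooth.
--     -list of length points to represent y values in sawtooth."""
--     x_return: list[int] = []
--     y_return: list[int] = []
--
--     current_y: int = 0
--     direction_up: bool = True
--     for i in range(points):
--         x_return.append(i)
--         y_return.append(current_y)
--         if direction_up:
--             current_y += 1
--             if current_y > turn_point:
--                 current_y = turn_point - 1
--                 direction_up = False
--         else:
--             current_y -= 1
--             if current_y < 0: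
--                 current_y = 1
--                 direction_up = True
--
--
--
--     return (x_return, y_return)
-- ===== SOURCE B (Python) =====
-- def generate_sawtooth(points, turn_point):
--     x = list(range(points))
--     period = 2 * turn_point
--     y = [min(i % period, period - i % period) for i in x]
--     return (x, y)
-- ===== Notes on version B (the rewrite author's own statement) =====
-- stated objective: simpler
-- what changed: Replaced A's rising/falling state machine with x = list(range(points)) and a per-index closed form y_i = min(i % 2t, 2t - i % 2t).
-- outside the precondition, e.g. on generate_sawtooth(2, 0): A returns ([0, 1], [0, -1]), B raises ZeroDivisionError; on generate_sawtooth(2, -1): A returns ([0, 1], [0, -2]), B returns ([0, 1], [-2, -1])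
import Mathlib
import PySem

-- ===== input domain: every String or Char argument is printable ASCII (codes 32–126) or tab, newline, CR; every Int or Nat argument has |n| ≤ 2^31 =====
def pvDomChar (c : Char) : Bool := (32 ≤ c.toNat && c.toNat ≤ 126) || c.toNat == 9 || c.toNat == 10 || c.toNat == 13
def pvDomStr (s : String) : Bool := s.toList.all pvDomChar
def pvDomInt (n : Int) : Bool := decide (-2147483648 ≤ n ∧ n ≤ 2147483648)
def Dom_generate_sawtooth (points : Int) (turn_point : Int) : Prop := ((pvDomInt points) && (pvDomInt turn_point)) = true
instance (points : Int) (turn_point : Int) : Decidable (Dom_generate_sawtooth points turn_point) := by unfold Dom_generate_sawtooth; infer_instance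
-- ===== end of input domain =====

-- B replaces A's rising/falling state machine by a per-index closed form (objective: simpler).

-- ===== PORT A =====
-- one iteration of A's for-loop: append i and current_y, then update (current_y, direction_up)
def sawStep (turn_point : Int) (st : (List Int × List Int) × (Int × Bool)) (i : Int) :
    (List Int × List Int) × (Int × Bool) :=
  let xr := st.1.1 ++ [i]
  let yr := st.1.2 ++ [st.2.1]
  if st.2.2 then
    let cy := st.2.1 + 1
    if cy > turn_point then ((xr, yr), (turn_point - 1, false)) else ((xr, yr), (cy, true))
  else
    let cy := st.2.1 - 1
    if cy < 0 then ((xr, yr), (1, true)) else ((xr, yr), (cy, false))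

def generate_sawtooth (points : Int) (turn_point : Int) : List Int × List Int :=
  ((PySem.List.pyRange 0 points 1).foldl (sawStep turn_point) (([], []), (0, true))).1

-- ===== PORT B =====
def generate_sawtooth_alt (points : Int) (turn_point : Int) : List Int × List Int :=
  let x := PySem.List.pyRange 0 points 1
  let period := 2 * turn_point
  let y := x.map (fun i => min (PySem.Int.mod i period) (period - PySem.Int.mod i period))
  (x, y)

-- ===== PRECONDITION & SPEC =====
-- Pre_ excludes positive points with turn_point ≤ 0: a sawtooth with non-positive amplitude is
-- unspecified, A's alternating 0,turn_point-1,1,turn_point-1,… output there is as accidental as any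
-- other, and B raises ZeroDivisionError at turn_point = 0 and follows Python's negative-divisor
-- modulo for turn_point < 0.
def Pre_generate_sawtooth (points : Int) (turn_point : Int) : Prop :=
  points ≤ 0 ∨ 1 ≤ turn_point
instance (points : Int) (turn_point : Int) : Decidable (Pre_generate_sawtooth points turn_point) := by
  unfold Pre_generate_sawtooth; infer_instance
def pvWitness_generate_sawtooth : Int × Int := (9, 3)

def Spec_generate_sawtooth (points : Int) (turn_point : Int) (out : List Int × List Int) : Prop := out = generate_sawtooth_alt points turn_point
instance (points : Int) (turn_point : Int) (out : List Int × List Int) : Decidable (Spec_generate_sawtooth points turn_point out) := by unfold Spec_generate_sawtooth; infer_instance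

-- ===== CLAIM (what is proved, stated in full; the proofs are below) =====
def Claim_equal_generate_sawtooth : Prop := ∀ (points : Int) (turn_point : Int), Dom_generate_sawtooth points turn_point → Pre_generate_sawtooth points turn_point → Spec_generate_sawtooth points turn_point (generate_sawtooth points turn_point)

-- ===== LEMMAS AND PROOFS =====

-- closed-form y value at index i (B's formula, with Python's mod rewritten to emod for 2*tp > 0)
def sawF (tp i : Int) : Int := min (i % (2 * tp)) (2 * tp - i % (2 * tp))
-- direction_up held by A's loop just before processing index n
def sawD (tp n : Int) : Bool :=
  if n = 0 then true else decide (1 ≤ n % (2 * tp) ∧ n % (2 * tp) ≤ tp)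

lemma saw_step_state (tp : Int) (htp : 1 ≤ tp) (n : Int) (hn : 0 ≤ n) :
    (if sawD tp n then
       (if sawF tp n + 1 > tp then (tp - 1, false) else (sawF tp n + 1, true))
     else
       (if sawF tp n - 1 < 0 then ((1 : Int), true) else (sawF tp n - 1, false)))
    = (sawF tp (n + 1), sawD tp (n + 1)) := by
  have hm : 2 ≤ 2 * tp := by omega
  have hr0 : 0 ≤ n % (2 * tp) := Int.emod_nonneg n (by omega)
  have hrm : n % (2 * tp) < 2 * tp := Int.emod_lt_of_pos n (by omega)
  have h1m : (1 : Int) % (2 * tp) = 1 := Int.emod_eq_of_lt (by norm_num) (by omega)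
  have hsucc : (n + 1) % (2 * tp) =
      if n % (2 * tp) = 2 * tp - 1 then 0 else n % (2 * tp) + 1 := by
    rw [Int.add_emod, h1m]
    split_ifs with h
    · rw [h]
      have : 2 * tp - 1 + 1 = 2 * tp := by ring
      rw [this, Int.emod_self]
    · exact Int.emod_eq_of_lt (by omega) (by omega)
  have hz : n = 0 → n % (2 * tp) = 0 := by intro h; rw [h]; exact Int.zero_emod _
  unfold sawF sawD
  rw [hsucc]
  by_cases hn0 : n = 0
  · have hr : n % (2 * tp) = 0 := hz hn0
    simp only [hn0]
    split_ifs <;> simp_all [min_def] <;> omega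
  · simp only [if_neg hn0, if_neg (by omega : ¬ n + 1 = 0)]
    split_ifs <;> simp_all [min_def] <;> omega

lemma sawStep_eq (tp : Int) (xr yr : List Int) (cy : Int) (dir : Bool) (i : Int) :
    sawStep tp ((xr, yr), (cy, dir)) i =
      ((xr ++ [i], yr ++ [cy]),
        if dir then (if cy + 1 > tp then (tp - 1, false) else (cy + 1, true))
        else (if cy - 1 < 0 then ((1 : Int), true) else (cy - 1, false))) := by
  unfold sawStep
  split_ifs <;> simp_all

lemma saw_loop (tp : Int) (htp : 1 ≤ tp) (n : Nat) :
    (PySem.List.pyRange 0 n 1).foldl (sawStep tp) (([], []), (0, true)) =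
      ((PySem.List.pyRange 0 n 1, (PySem.List.pyRange 0 n 1).map (sawF tp)),
        (sawF tp n, sawD tp n)) := by
  induction n with
  | zero =>
      rw [PySem.List.pyRange_one_eq_nil (by norm_num)]
      have h0 : sawF tp 0 = 0 := by
        unfold sawF
        rw [Int.zero_emod]
        simp [min_def]
        omega
      simp [h0, sawD]
  | succ n ih =>
      have hcast : ((n + 1 : Nat) : Int) = (n : Int) + 1 := by push_cast; ring
      rw [hcast, PySem.List.pyRange_one_succ_right (by positivity), List.foldl_append, ih,
        List.map_append]
      have hstep := saw_step_state tp htp n (by positivity)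
      rw [List.foldl_cons, List.foldl_nil, sawStep_eq, hstep]
      simp
theorem generate_sawtooth_spec : Claim_equal_generate_sawtooth := by
  unfold Claim_equal_generate_sawtooth
  intro points tp _ hpre
  unfold Spec_generate_sawtooth generate_sawtooth generate_sawtooth_alt
  by_cases hp : points ≤ 0
  · rw [PySem.List.pyRange_one_eq_nil hp]
    simp
  · have htp : 1 ≤ tp := by
      rcases hpre with h | h
      · omega
      · exact h
    have hfun : (fun i => min (PySem.Int.mod i (2 * tp)) (2 * tp - PySem.Int.mod i (2 * tp)))
        = sawF tp := by
      funext i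
      rw [PySem.Int.mod_eq_emod_of_pos (by omega)]
      rfl
    have hpts : points = ((points.toNat : Nat) : Int) := (Int.toNat_of_nonneg (by omega)).symm
    rw [hpts]
    simp only [hfun]
    rw [saw_loop tp htp points.toNat]
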